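-- pv_equiv track=rewrite | github.com/zurabkituashvili/Python-for-Data-Quality-Engineers | Task4/task2.py | collect_key_occurrences
-- ===== SOURCE A (Python) =====
-- from typing import Dict, List, Tuple
--
-- def collect_key_occurrences(
--     dict_list: List[Dict[str, int]],
-- ) -> Dict[str, List[Tuple[int, int]]]:
--     key_occurrences: Dict[str, List[Tuple[int, int]]] = {}
--
--     for index, current_dict in enumerate(dict_list, start=1):
--         for key, value in current_dict.items():
--             key_occurrences.setdefault(key, []).append((index, value))
--
--     return key_occurrences
-- ===== SOURCE B (Python) =====
-- def collect_key_occurrences(dict_list):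
--     # Flatten to (key, (index, value)) triples, then build each key's group
--     # by one filter pass per distinct key (keys in first-occurrence order).
--     triples = [(k, (i, v)) for i, d in enumerate(dict_list, 1) for k, v in d.items()]
--     keys = dict.fromkeys(k for k, _ in triples)
--     return {k: [iv for k2, iv in triples if k2 == k] for k in keys}
-- ===== Notes on version B (the rewrite author's own statement) =====
-- stated objective: alternative
-- what changed: Replaces the single accumulating setdefault/append pass with a flatten-then-group decomposition: build the flat (key,(index,value)) triple list, dedup the keys in first-occurrence order, and produce each key's group by a filter pass over the triples.
import Mathlib
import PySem

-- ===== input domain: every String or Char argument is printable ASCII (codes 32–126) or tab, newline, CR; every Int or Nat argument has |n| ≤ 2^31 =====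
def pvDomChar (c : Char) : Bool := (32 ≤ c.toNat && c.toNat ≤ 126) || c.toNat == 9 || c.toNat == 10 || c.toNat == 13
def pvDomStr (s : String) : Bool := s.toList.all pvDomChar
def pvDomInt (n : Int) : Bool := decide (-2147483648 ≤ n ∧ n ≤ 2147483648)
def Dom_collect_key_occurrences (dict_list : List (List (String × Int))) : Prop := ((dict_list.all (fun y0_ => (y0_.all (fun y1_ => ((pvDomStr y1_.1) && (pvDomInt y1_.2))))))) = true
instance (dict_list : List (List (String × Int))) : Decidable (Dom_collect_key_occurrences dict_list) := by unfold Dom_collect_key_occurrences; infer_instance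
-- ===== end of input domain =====

-- B replaces A's single accumulating setdefault/append pass with a flatten-then-group
-- decomposition (flat triple list, dedup keys, one filter pass per key); alternative, not faster.


-- ===== PORT A =====
-- for index, current_dict in enumerate(dict_list, start=1):
--   for key, value in current_dict.items():
--     key_occurrences.setdefault(key, []).append((index, value))   -- = d[key] = d.get(key, []) + [(index, value)]
def collect_key_occurrences (dict_list : List (List (String × Int))) : List (String × List (Int × Int)) :=
  ((PySem.List.enumerate dict_list 1).foldl
      (fun d p => p.2.foldl (fun d kv => d.modify kv.1 [] (· ++ [(p.1, kv.2)])) d)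
      (PySem.Dict.empty : PySem.Dict String (List (Int × Int)))).items

-- ===== PORT B =====
-- triples = [(k, (i, v)) for i, d in enumerate(dict_list, 1) for k, v in d.items()]
-- keys = dict.fromkeys(k for k, _ in triples)
-- return {k: [iv for k2, iv in triples if k2 == k] for k in keys}
def collect_key_occurrences_alt (dict_list : List (List (String × Int))) : List (String × List (Int × Int)) :=
  let triples : List (String × Int × Int) :=
    (PySem.List.enumerate dict_list 1).flatMap (fun p => p.2.map (fun kv => (kv.1, (p.1, kv.2))))
  (PySem.List.dedup (triples.map (·.1))).map
    (fun k => (k, (triples.filter (fun t => t.1 == k)).map (·.2)))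

-- ===== PRECONDITION & SPEC =====
def Spec_collect_key_occurrences (dict_list : List (List (String × Int))) (out : List (String × List (Int × Int))) : Prop := out = collect_key_occurrences_alt dict_list
instance (dict_list : List (List (String × Int))) (out : List (String × List (Int × Int))) : Decidable (Spec_collect_key_occurrences dict_list out) := by unfold Spec_collect_key_occurrences; infer_instance

-- ===== CLAIM (what is proved, stated in full; the proofs are below) =====
def Claim_equal_collect_key_occurrences : Prop := ∀ (dict_list : List (List (String × Int))), Dom_collect_key_occurrences dict_list → Spec_collect_key_occurrences dict_list (collect_key_occurrences dict_list)

-- ===== LEMMAS AND PROOFS =====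

-- A's nested loop is the flat modify-loop over the flattened (key, (index, value)) triples.
theorem foldA_eq_foldl_flat (xs : List (Int × List (String × Int)))
    (d : PySem.Dict String (List (Int × Int))) :
    xs.foldl (fun d p => p.2.foldl (fun d kv => d.modify kv.1 [] (· ++ [(p.1, kv.2)])) d) d
      = (xs.flatMap (fun p => p.2.map (fun kv => (kv.1, (p.1, kv.2))))).foldl
          (fun d t => d.modify t.1 [] (· ++ [t.2])) d := by
  induction xs generalizing d with
  | nil => rfl
  | cons x xs ih => simp [List.flatMap_cons, List.foldl_append, ih, List.foldl_map]

-- The flat modify-loop, read off as items = keys (first occurrences) paired with filtered values.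
theorem items_foldl_flat (l : List (String × Int × Int)) :
    ((l.foldl (fun d t => d.modify t.1 [] (· ++ [t.2]))
        (PySem.Dict.empty : PySem.Dict String (List (Int × Int)))).items)
      = (PySem.List.dedup (l.map (·.1))).map
          (fun k => (k, (l.filter (fun t => t.1 == k)).map (·.2))) := by
  have hnd : ((l.foldl (fun d t => d.modify t.1 [] (· ++ [t.2]))
      (PySem.Dict.empty : PySem.Dict String (List (Int × Int)))).keys).Nodup :=
    PySem.Dict.nodup_keys_foldl_modify_key l (·.1) [] _ _ PySem.Dict.nodup_keys_empty
  rw [PySem.Dict.items_eq_map_keys _ hnd [], PySem.Dict.keys_foldl_modify_key]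
  have hkeys : PySem.Set.update (PySem.Dict.empty : PySem.Dict String (List (Int × Int))).keys
      (l.map (·.1)) = PySem.List.dedup (l.map (·.1)) := by
    simp [PySem.Set.update, PySem.Set.ofList_eq_foldl, PySem.List.dedup_eq_ofList]
  rw [hkeys]
  refine List.map_congr_left (fun k _ => ?_)
  rw [PySem.Dict.getD_foldl_modify_append]
  simp

-- ===== VERDICT (by name: the statement is the Claim_ definition above) =====
theorem collect_key_occurrences_spec : Claim_equal_collect_key_occurrences := by
  intro dict_list _
  unfold Spec_collect_key_occurrences collect_key_occurrences collect_key_occurrences_alt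
  rw [foldA_eq_foldl_flat, items_foldl_flat]
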